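-- pv_equiv track=rewrite | github.com/tsankesara/CodeChef-Submissions | Beginner/Playing with Matches - MATCHES.py | count
-- ===== SOURCE A (Python) =====
-- def count(a):
--     match = 0
--     i = 0
--     while len(a) > i:
--         if a[i] == '0':
--             match = match + 6
--         if a[i] == '1':
--             match = match + 2
--         if a[i] == '2':
--             match = match + 5
--         if a[i] == '3':
--             match = match + 5
--         if a[i] == '4':
--             match = match + 4
--         if a[i] == '5':
--             match = match + 5
--         if a[i] == '6':
--             match = match + 6
--         if a[i] == '7':
--             match = match + 3
--         if a[i] == '8':
--             match = match + 7
--         if a[i] == '9':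
--             match = match + 6
--         i = i+1
--     return match
-- ===== SOURCE B (Python) =====
-- COSTS = [('0', 6), ('1', 2), ('2', 5), ('3', 5), ('4', 4),
--          ('5', 5), ('6', 6), ('7', 3), ('8', 7), ('9', 6)]
--
-- def count(a):
--     freq = {}
--     for ch in a:
--         freq[ch] = freq.get(ch, 0) + 1
--     return sum(freq.get(d, 0) * c for d, c in COSTS)
-- ===== Notes on version B (the rewrite author's own statement) =====
-- stated objective: faster
-- what changed: Replaces the per-character 10-way if-cascade accumulation with a histogram pass (build a character frequency dict once) followed by a weighted sum over the 10-entry cost table, so the per-character work drops to one dict update instead of ten comparisons.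
import Mathlib
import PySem

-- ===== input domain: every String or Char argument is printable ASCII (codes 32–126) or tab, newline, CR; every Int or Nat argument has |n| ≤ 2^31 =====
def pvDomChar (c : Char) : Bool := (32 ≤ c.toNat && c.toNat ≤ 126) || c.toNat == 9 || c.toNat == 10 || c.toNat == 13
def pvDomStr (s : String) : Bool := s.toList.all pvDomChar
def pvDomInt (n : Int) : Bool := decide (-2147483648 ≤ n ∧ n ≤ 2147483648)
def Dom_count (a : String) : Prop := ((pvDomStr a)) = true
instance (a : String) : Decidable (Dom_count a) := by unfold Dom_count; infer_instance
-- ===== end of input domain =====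

-- B replaces A's per-character if-cascade with a frequency dict built once, then a weighted sum over a cost table (alternative decomposition, same cost).


-- ===== PORT A =====
-- while loop over indices, ten stacked independent ifs each adding to `match`
def countGo : List Char → Int → Int
  | [], m => m
  | c :: rest, m =>
    let m := if c = '0' then m + 6 else m
    let m := if c = '1' then m + 2 else m
    let m := if c = '2' then m + 5 else m
    let m := if c = '3' then m + 5 else m
    let m := if c = '4' then m + 4 else m
    let m := if c = '5' then m + 5 else m
    let m := if c = '6' then m + 6 else m
    let m := if c = '7' then m + 3 else m
    let m := if c = '8' then m + 7 else m
    let m := if c = '9' then m + 6 else m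
    countGo rest m

def count (a : String) : Int := countGo a.toList 0

-- ===== PORT B =====
def pvCosts : List (Char × Int) :=
  [('0', 6), ('1', 2), ('2', 5), ('3', 5), ('4', 4),
   ('5', 5), ('6', 6), ('7', 3), ('8', 7), ('9', 6)]

def count_alt (a : String) : Int :=
  let freq := a.toList.foldl (fun d ch => d.insert ch (d.getD ch 0 + 1)) PySem.Dict.empty
  (pvCosts.map (fun p => freq.getD p.1 0 * p.2)).sum

-- ===== PRECONDITION & SPEC =====
def Spec_count (a : String) (out : Int) : Prop := out = count_alt a
instance (a : String) (out : Int) : Decidable (Spec_count a out) := by unfold Spec_count; infer_instance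

-- ===== CLAIM (what is proved, stated in full; the proofs are below) =====
def Claim_equal_count : Prop := ∀ (a : String), Dom_count a → Spec_count a (count a)

-- ===== LEMMAS AND PROOFS =====

-- weighted sum of digit counts, the common value of both ports
def wsum (l : List Char) : Int :=
  (l.count '0' : Int) * 6 + (l.count '1' : Int) * 2 + (l.count '2' : Int) * 5 +
  (l.count '3' : Int) * 5 + (l.count '4' : Int) * 4 + (l.count '5' : Int) * 5 +
  (l.count '6' : Int) * 6 + (l.count '7' : Int) * 3 + (l.count '8' : Int) * 7 +
  (l.count '9' : Int) * 6

lemma countGo_eq (l : List Char) : ∀ m : Int, countGo l m = m + wsum l := by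
  induction l with
  | nil => intro m; simp [countGo, wsum]
  | cons c rest ih =>
    intro m
    by_cases hc : c ∈ ['0','1','2','3','4','5','6','7','8','9']
    · fin_cases hc <;> simp [countGo, ih, wsum] <;> ring
    · simp only [List.mem_cons, List.not_mem_nil, or_false] at hc
      push Not at hc
      obtain ⟨h0, h1, h2, h3, h4, h5, h6, h7, h8, h9⟩ := hc
      simp [countGo, ih, wsum, h0, h1, h2, h3, h4, h5, h6, h7, h8, h9]

lemma count_alt_eq (a : String) : count_alt a = wsum a.toList := by
  unfold count_alt
  rw [PySem.Dict.foldl_insert_getD_add_one_eq_counter]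
  simp [pvCosts, PySem.Dict.getD_counter, wsum]
  ring

-- ===== VERDICT (by name: the statement is the Claim_ definition above) =====
theorem count_spec : Claim_equal_count := by
  intro a _
  unfold Spec_count count
  rw [countGo_eq, count_alt_eq]
  simp
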